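-- pv_equiv track=rewrite | github.com/ahll19/PULSE | src/log/seu.py | _rm_before_seu
-- ===== SOURCE A (Python) =====
-- from typing import List
--
-- def _rm_before_seu(raw_lines_copy: List[str]) -> List[str]:
--     clean = []
--     should_append = False
--
--     for line in raw_lines_copy:
--         if "UVM Doing fault injection." == line:
--             should_append = True
--
--         if not should_append:
--             continue
--
--         clean.append(line)
--
--     return clean
-- ===== SOURCE B (Python) =====
-- from typing import List
--
-- def _rm_before_seu(raw_lines_copy: List[str]) -> List[str]:
--     try:
--         i = raw_lines_copy.index("UVM Doing fault injection.")
--     except ValueError: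
--         return []
--     return raw_lines_copy[i:]
-- ===== Notes on version B (the rewrite author's own statement) =====
-- stated objective: simpler
-- what changed: Replaces the flag-driven accumulation loop with a direct find-then-slice: locate the first marker occurrence with list.index and return the tail slice from it, [] if the marker is absent.
import Mathlib
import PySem

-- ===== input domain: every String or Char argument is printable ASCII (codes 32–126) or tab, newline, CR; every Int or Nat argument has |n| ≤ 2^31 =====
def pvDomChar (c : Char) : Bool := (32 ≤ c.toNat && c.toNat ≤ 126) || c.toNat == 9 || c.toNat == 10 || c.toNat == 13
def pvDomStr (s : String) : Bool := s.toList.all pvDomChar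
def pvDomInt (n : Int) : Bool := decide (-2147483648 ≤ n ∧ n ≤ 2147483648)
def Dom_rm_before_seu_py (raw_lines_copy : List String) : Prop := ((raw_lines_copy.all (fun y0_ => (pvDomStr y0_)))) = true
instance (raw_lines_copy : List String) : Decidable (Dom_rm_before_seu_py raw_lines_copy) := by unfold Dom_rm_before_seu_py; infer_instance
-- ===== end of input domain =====

-- B replaces A's flag-driven accumulation loop with a direct find-then-slice (first marker index, then tail slice); objective: simpler.


-- ===== PORT A =====
-- loop body: first the marker test may set the flag, then 'continue' unless the flag is set, else append
def rmSeuStep (s : List String × Bool) (line : String) : List String × Bool :=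
  let s' := if "UVM Doing fault injection." == line then (s.1, true) else s
  if !s'.2 then s' else (s'.1 ++ [line], s'.2)

def rm_before_seu_py (raw_lines_copy : List String) : List String :=
  (raw_lines_copy.foldl rmSeuStep ([], false)).1

-- ===== PORT B =====
def rm_before_seu_py_alt (raw_lines_copy : List String) : List String :=
  match PySem.List.index? raw_lines_copy "UVM Doing fault injection." with
  | none => []
  | some i => PySem.List.slice raw_lines_copy (some (i : Int)) none

-- ===== PRECONDITION & SPEC =====
def Spec_rm_before_seu_py (raw_lines_copy : List String) (out : List String) : Prop := out = rm_before_seu_py_alt raw_lines_copy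
instance (raw_lines_copy : List String) (out : List String) : Decidable (Spec_rm_before_seu_py raw_lines_copy out) := by unfold Spec_rm_before_seu_py; infer_instance

-- ===== CLAIM (what is proved, stated in full; the proofs are below) =====
def Claim_equal_rm_before_seu_py : Prop := ∀ (raw_lines_copy : List String), Dom_rm_before_seu_py raw_lines_copy → Spec_rm_before_seu_py raw_lines_copy (rm_before_seu_py raw_lines_copy)

-- ===== LEMMAS AND PROOFS =====
theorem rmSeu_foldl_true (xs : List String) (acc : List String) :
    (xs.foldl rmSeuStep (acc, true)).1 = acc ++ xs := by
  induction xs generalizing acc with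
  | nil => simp
  | cons x xs ih =>
    simp only [List.foldl_cons, rmSeuStep]
    split <;> simp [ih]

theorem rmSeu_foldl_false (xs : List String) (acc : List String) :
    (xs.foldl rmSeuStep (acc, false)).1 =
      acc ++ (match PySem.List.index? xs "UVM Doing fault injection." with
              | none => []
              | some i => xs.drop i) := by
  induction xs generalizing acc with
  | nil => simp [PySem.List.index?]
  | cons x xs ih =>
    by_cases h : "UVM Doing fault injection." = x
    · subst h
      rw [PySem.List.index?_cons_self]
      simpa [rmSeuStep] using rmSeu_foldl_true xs (acc ++ ["UVM Doing fault injection."])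
    · have hidx := PySem.List.index?_cons_of_ne (xs := xs) (Ne.symm h)
      have hb : ("UVM Doing fault injection." == x) = false := by simpa using h
      rw [hidx]
      simp only [List.foldl_cons, rmSeuStep, hb, Bool.false_eq_true, if_false, Bool.not_false,
        if_true]
      rw [ih]
      cases PySem.List.index? xs "UVM Doing fault injection." <;> simp

theorem rm_before_seu_py_spec : Claim_equal_rm_before_seu_py := by
  intro xs _
  show rm_before_seu_py xs = rm_before_seu_py_alt xs
  unfold rm_before_seu_py rm_before_seu_py_alt
  rw [rmSeu_foldl_false]
  cases h : PySem.List.index? xs "UVM Doing fault injection." with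
  | none => simp
  | some i => simp [PySem.List.slice_from_natCast]
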